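-- pv_equiv track=rewrite | github.com/Xyce/XDM | src/python/xdm/expr/expr_utils.py | ternary_clean_up
-- ===== SOURCE A (Python) =====
-- def ternary_clean_up(in_expression):
--     q_list = []
--     out_expression = ""
--
--     # first check ternary operator is in expression
--     if "?" in in_expression and ":" in in_expression:
--
--         # Next, make sure every "?" is followed by a ":" and that there are equal number of each.
--         # If not, give warning, return the expression, and continue translating.
--         # TODO: figure out if it's better to comment out? might not be, since expression may be
--         #       on a line containing multiple expressions, which would end up commenting out everything
--         #       else
--         for char in in_expression:
--             if char == "?":
--                 q_list.append(char)
--                 out_expression += char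
--             elif char == ":":
--                 if not q_list:
--                     return in_expression
--                 else:
--                     q_list.pop()
--
--                     # if there's an empty space to the left of ":", no need to add another
--                     if out_expression[-1] == " ":
--                         out_expression += char
--                     else:
--                         out_expression += " " + char
--             else:
--                 out_expression += char
--
--         if q_list:
--             return in_expression
--
--     # if no ternary operator in expression, return expression unchanged
--     else:
--         return in_expression
--
--     return out_expression
-- ===== SOURCE B (Python) =====
-- def ternary_clean_up(in_expression):
--     # Two-pass decomposition: validate ?/: balance with an integer counter,
--     # then build the spaced result pairwise from (previous char, char).
--     if "?" not in in_expression or ":" not in in_expression: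
--         return in_expression
--     balance = 0
--     for ch in in_expression:
--         if ch == "?":
--             balance += 1
--         elif ch == ":":
--             if balance == 0:
--                 return in_expression
--             balance -= 1
--     if balance != 0:
--         return in_expression
--     return "".join(
--         " " + c if c == ":" and p != " " else c
--         for p, c in zip(" " + in_expression, in_expression)
--     )
-- ===== Notes on version B (the rewrite author's own statement) =====
-- stated objective: simpler
-- what changed: Replaced A's single interleaved scan that maintains a '?'-stack while building the output character by character with a validate-then-transform decomposition: an integer balance counter validates the ?/: nesting, and only then one pairwise pass over (previous char, char) inserts the missing spaces before colons.
import Mathlib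
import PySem

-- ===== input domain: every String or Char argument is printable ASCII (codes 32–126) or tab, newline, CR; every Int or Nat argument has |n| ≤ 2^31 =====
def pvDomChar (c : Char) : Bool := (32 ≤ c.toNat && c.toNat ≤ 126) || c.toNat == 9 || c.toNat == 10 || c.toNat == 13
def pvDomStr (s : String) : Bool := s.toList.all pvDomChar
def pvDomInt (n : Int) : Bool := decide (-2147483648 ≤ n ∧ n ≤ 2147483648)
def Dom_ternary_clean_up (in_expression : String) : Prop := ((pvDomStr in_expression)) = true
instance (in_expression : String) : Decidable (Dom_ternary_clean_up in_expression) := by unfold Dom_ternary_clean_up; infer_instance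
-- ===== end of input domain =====

-- B replaces A's single interleaved stack-and-build scan by a validate-then-transform
-- decomposition (counter pass, then a pairwise zip rebuild); objective: simpler.


-- ===== PORT A =====
-- the for-loop with its early returns: none = "return in_expression" taken inside the loop/after it
def ternAuxA : List Char → List Char → List Char → Option (List Char)
  | [], q_list, out =>
      if q_list ≠ [] then none else some out
  | c :: rest, q_list, out =>
      if c = '?' then ternAuxA rest (q_list ++ [c]) (out ++ [c])
      else if c = ':' then
        match q_list with
        | [] => none
        | _ :: _ =>
          let q' := q_list.dropLast   -- q_list.pop()
          if PySem.List.pyGet? out (-1) = some ' ' then ternAuxA rest q' (out ++ [c])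
          else ternAuxA rest q' (out ++ [' ', c])
      else ternAuxA rest q_list (out ++ [c])

def ternary_clean_up (in_expression : String) : String :=
  if PySem.Str.isIn "?" in_expression ∧ PySem.Str.isIn ":" in_expression then
    match ternAuxA in_expression.toList [] [] with
    | none => in_expression
    | some out => String.mk out
  else in_expression

-- ===== PORT B =====
-- validation pass: integer balance counter, false = "return in_expression"
def ternBalB : List Char → Int → Bool
  | [], balance => !(balance ≠ 0)
  | c :: rest, balance =>
      if c = '?' then ternBalB rest (balance + 1)
      else if c = ':' then
        if balance = 0 then false else ternBalB rest (balance - 1)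
      else ternBalB rest balance

def ternary_clean_up_alt (in_expression : String) : String :=
  if ¬ (PySem.Str.isIn "?" in_expression ∧ PySem.Str.isIn ":" in_expression) then
    in_expression
  else if ¬ ternBalB in_expression.toList 0 then in_expression
  else
    String.mk
      (((' ' :: in_expression.toList).zip in_expression.toList).flatMap
        (fun pc => if pc.2 = ':' ∧ pc.1 ≠ ' ' then [' ', pc.2] else [pc.2]))

-- ===== PRECONDITION & SPEC =====
def Spec_ternary_clean_up (in_expression : String) (out : String) : Prop := out = ternary_clean_up_alt in_expression
instance (in_expression : String) (out : String) : Decidable (Spec_ternary_clean_up in_expression out) := by unfold Spec_ternary_clean_up; infer_instance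

-- ===== CLAIM (what is proved, stated in full; the proofs are below) =====
def Claim_equal_ternary_clean_up : Prop := ∀ (in_expression : String), Dom_ternary_clean_up in_expression → Spec_ternary_clean_up in_expression (ternary_clean_up in_expression)

-- ===== LEMMAS AND PROOFS =====

-- B's transform, recast as a recursion on (previous char, rest) for the induction
def ternTrans : Char → List Char → List Char
  | _, [] => []
  | p, c :: rest => (if c = ':' ∧ p ≠ ' ' then [' ', c] else [c]) ++ ternTrans c rest

theorem ternTrans_eq_zip (l : List Char) (p : Char) :
    ((p :: l).zip l).flatMap
      (fun pc => if pc.2 = ':' ∧ pc.1 ≠ ' ' then [' ', pc.2] else [pc.2]) = ternTrans p l := by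
  induction l generalizing p with
  | nil => rfl
  | cons c rest ih => simp [ternTrans, List.zip, ← ih c, List.flatMap]

-- main invariant: A's scan with stack q and output `out` (whose last char is p, unless
-- out = [] in which case the scan has consumed nothing and q = []) equals
-- B's counter validation on q.length followed by the pairwise transform.
theorem ternAux_eq (l : List Char) (q out : List Char) (p : Char)
    (h : PySem.List.pyGet? out (-1) = some p ∨ (out = [] ∧ p = ' ' ∧ q = [])) :
    ternAuxA l q out =
      if ternBalB l (q.length : Int) then some (out ++ ternTrans p l) else none := by
  induction l generalizing q out p with
  | nil =>
      simp only [ternAuxA, ternBalB, ternTrans]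
      by_cases hq : q = [] <;> simp [hq]
  | cons c rest ih =>
      by_cases hc : c = '?'
      · subst hc
        simp only [ternAuxA, ternBalB, ternTrans]
        rw [ih (q ++ ['?']) (out ++ ['?']) '?'
              (Or.inl (PySem.List.pyGet?_neg_one_append_singleton _ _))]
        simp
      · by_cases hc2 : c = ':'
        · subst hc2
          simp only [ternAuxA, ternBalB, ternTrans, if_neg hc]
          match hq : q with
          | [] =>
            simp
          | a :: q' =>
            have hqlen : ¬ ((a :: q').length : Int) = 0 := by
              have : (a :: q').length = q'.length + 1 := rfl
              omega
            have hout : PySem.List.pyGet? out (-1) = some p := by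
              rcases h with h | ⟨_, _, h⟩
              · exact h
              · exact absurd h (by simp)
            rw [hout, if_neg hqlen]
            by_cases hp : p = ' '
            · subst hp
              rw [if_pos rfl,
                  ih ((a :: q').dropLast) (out ++ [':']) ':'
                    (Or.inl (PySem.List.pyGet?_neg_one_append_singleton _ _))]
              simp
            · rw [if_neg (fun hcon => hp (Option.some.inj hcon)),
                  ih ((a :: q').dropLast) (out ++ [' ', ':']) ':'
                    (Or.inl (by
                      have := PySem.List.pyGet?_neg_one_append_singleton (out ++ [' ']) ':'
                      simpa using this))]
              simp [hp]
        · simp only [ternAuxA, ternBalB, ternTrans, if_neg hc, if_neg hc2]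
          rw [ih q (out ++ [c]) c (Or.inl (PySem.List.pyGet?_neg_one_append_singleton _ _))]
          simp [hc2]

-- ===== VERDICT (by name: the statement is the Claim_ definition above) =====
theorem ternary_clean_up_spec : Claim_equal_ternary_clean_up := by
  intro s _
  unfold Spec_ternary_clean_up ternary_clean_up ternary_clean_up_alt
  by_cases hq : PySem.Str.isIn "?" s ∧ PySem.Str.isIn ":" s
  · rw [if_pos hq, if_neg (by simpa using hq)]
    rw [ternAux_eq s.toList [] [] ' ' (Or.inr ⟨rfl, rfl, rfl⟩)]
    by_cases hb : ternBalB s.toList 0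
    · rw [if_neg (show ¬¬(ternBalB s.toList 0 = true) from fun hcon => hcon hb)]
      simp only [List.length_nil, Nat.cast_zero, hb, if_true]
      rw [← ternTrans_eq_zip s.toList ' ']
      simp
    · simp only [List.length_nil, Nat.cast_zero, if_neg hb]
      rw [if_pos hb]
  · rw [if_neg hq, if_pos (by simpa using hq)]
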